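-- pv_equiv track=rewrite | github.com/nos0uls/Soulight | full_replay_fixed.py | extract_keystream_from_zeros
-- ===== SOURCE A (Python) =====
-- def extract_keystream_from_zeros(pkt, period, zero_start, zero_count):
--     """
--     Извлекает keystream из нулевых байт header.
--
--     cipher[i] = plain[i] ^ ks[(i + phase) % period]
--     Если plain[i] = 0, то cipher[i] = ks[(i + phase) % period]
--
--     Возвращает: (ks_list, phase)
--     """
--     # Собираем keystream байты из нулей
--     ks_bytes = {}
--     for i in range(zero_start, zero_start + zero_count):
--         if i < len(pkt):
--             pos_in_period = i % period
--             if pos_in_period not in ks_bytes: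
--                 ks_bytes[pos_in_period] = pkt[i]
--
--     # Преобразуем в список
--     ks = [0] * period
--     for pos, val in ks_bytes.items():
--         ks[pos] = val
--
--     return ks
-- ===== SOURCE B (Python) =====
-- def extract_keystream_from_zeros(pkt, period, zero_start, zero_count):
--     # Per-residue closed form: the first index >= zero_start congruent to r mod period
--     # is zero_start + (r - zero_start) % period; take pkt there if it lies in the
--     # valid zero window, else 0.  O(period), independent of zero_count.
--     end = min(zero_start + zero_count, len(pkt))
--     ks = []
--     for r in range(period):
--         i = zero_start + (r - zero_start) % period
--         ks.append(pkt[i] if i < end else 0)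
--     return ks
-- ===== Notes on version B (the rewrite author's own statement) =====
-- stated objective: alternative
-- what changed: Instead of scanning the zero window and keeping the first byte per residue (dict + write-back), B iterates over the residues 0..period-1 and computes the first in-window index for each residue by a closed-form modular formula zero_start + (r - zero_start) % period, reading pkt there directly; cost is O(period) independent of zero_count.
import Mathlib
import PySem

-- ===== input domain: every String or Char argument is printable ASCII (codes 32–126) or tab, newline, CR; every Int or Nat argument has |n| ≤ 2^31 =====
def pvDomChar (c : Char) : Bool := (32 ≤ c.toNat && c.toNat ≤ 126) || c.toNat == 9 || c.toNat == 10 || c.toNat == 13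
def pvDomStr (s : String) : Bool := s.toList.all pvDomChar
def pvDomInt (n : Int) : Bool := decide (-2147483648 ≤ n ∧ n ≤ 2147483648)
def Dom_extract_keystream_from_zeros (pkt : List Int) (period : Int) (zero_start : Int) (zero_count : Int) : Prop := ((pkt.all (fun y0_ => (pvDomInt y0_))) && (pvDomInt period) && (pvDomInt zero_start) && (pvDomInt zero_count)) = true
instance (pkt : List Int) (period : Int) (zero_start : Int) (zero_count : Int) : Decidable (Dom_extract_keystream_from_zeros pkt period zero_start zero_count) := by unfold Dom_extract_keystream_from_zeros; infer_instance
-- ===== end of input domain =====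

-- B replaces A's window scan (dict of first byte per residue + write-back loop) by a
-- per-residue closed-form index computation (objective: alternative algorithm).

-- ===== PORT A =====
-- literal port of A: first loop builds the dict of FIRST bytes per residue, then [0]*period,
-- then the dict's items are written in insertion order.  pkt[i] is ported as the total
-- pyGetD (exact under Pre_, which rules the IndexError region out) and ks[pos]=val as the
-- total pySetD (under Pre_ every written pos is in range, as in the Python).
def extract_keystream_from_zeros (pkt : List Int) (period : Int) (zero_start : Int) (zero_count : Int) : List Int :=
  let ks_bytes : PySem.Dict Int Int :=
    (PySem.List.pyRange zero_start (zero_start + zero_count) 1).foldl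
      (fun d i =>
        if i < (pkt.length : Int) then
          let pos := PySem.Int.mod i period
          if d.contains pos then d else d.insert pos (PySem.List.pyGetD pkt i 0)
        else d)
      PySem.Dict.empty
  let ks := PySem.List.pyRepeat [(0 : Int)] period
  ks_bytes.items.foldl (fun ks pv => PySem.List.pySetD ks pv.1 pv.2) ks

-- ===== PORT B =====
-- literal port of Source B: clamp the window end, then for each residue r in range(period)
-- compute i = zero_start + (r - zero_start) % period and append pkt[i] if i < end else 0.
def extract_keystream_from_zeros_alt (pkt : List Int) (period : Int) (zero_start : Int) (zero_count : Int) : List Int :=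
  let endi := min (zero_start + zero_count) (pkt.length : Int)
  (PySem.List.pyRange 0 period 1).foldl
    (fun ks r =>
      let i := zero_start + PySem.Int.mod (r - zero_start) period
      ks ++ [if i < endi then PySem.List.pyGetD pkt i 0 else 0])
    []

-- ===== PRECONDITION & SPEC =====
-- Pre_ excludes exactly the inputs on which A raises: when the guarded loop body runs at
-- least once (zero_count ≥ 1 and zero_start < len(pkt)), period ≤ 0 gives ZeroDivisionError
-- or IndexError in the write-back, and zero_start < -len(pkt) gives IndexError at pkt[i].
def Pre_extract_keystream_from_zeros (pkt : List Int) (period : Int) (zero_start : Int) (zero_count : Int) : Prop :=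
  (1 ≤ zero_count ∧ zero_start < (pkt.length : Int)) →
    (1 ≤ period ∧ -(pkt.length : Int) ≤ zero_start)
instance (pkt : List Int) (period : Int) (zero_start : Int) (zero_count : Int) : Decidable (Pre_extract_keystream_from_zeros pkt period zero_start zero_count) := by unfold Pre_extract_keystream_from_zeros; infer_instance

def pvWitness_extract_keystream_from_zeros : List Int × Int × Int × Int := ([1, 2, 3], 2, 0, 3)

def Spec_extract_keystream_from_zeros (pkt : List Int) (period : Int) (zero_start : Int) (zero_count : Int) (out : List Int) : Prop := out = extract_keystream_from_zeros_alt pkt period zero_start zero_count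
instance (pkt : List Int) (period : Int) (zero_start : Int) (zero_count : Int) (out : List Int) : Decidable (Spec_extract_keystream_from_zeros pkt period zero_start zero_count out) := by unfold Spec_extract_keystream_from_zeros; infer_instance

-- ===== CLAIM (what is proved, stated in full; the proofs are below) =====
def Claim_equal_extract_keystream_from_zeros : Prop := ∀ (pkt : List Int) (period : Int) (zero_start : Int) (zero_count : Int), Dom_extract_keystream_from_zeros pkt period zero_start zero_count → Pre_extract_keystream_from_zeros pkt period zero_start zero_count → Spec_extract_keystream_from_zeros pkt period zero_start zero_count (extract_keystream_from_zeros pkt period zero_start zero_count)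

-- ===== LEMMAS AND PROOFS =====

-- step of A's first loop without the 'i < len(pkt)' guard (used after trimming the range)
def pvStepNG (pkt : List Int) (period : Int) (d : PySem.Dict Int Int) (i : Int) : PySem.Dict Int Int :=
  if d.contains (PySem.Int.mod i period) then d
  else d.insert (PySem.Int.mod i period) (PySem.List.pyGetD pkt i 0)

lemma pvModBounds {period : Int} (hp : 0 < period) (i : Int) :
    0 ≤ PySem.Int.mod i period ∧ PySem.Int.mod i period < period := by
  rw [PySem.Int.mod_eq_emod_of_pos hp]
  exact ⟨Int.emod_nonneg _ (by omega), Int.emod_lt_of_pos _ hp⟩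

-- a multiple of p strictly between -p and p is 0
lemma pvDvdSmall {p d : Int} (hp : 0 < p) (hdvd : p ∣ d) (h1 : -p < d) (h2 : d < p) : d = 0 := by
  obtain ⟨k, rfl⟩ := hdvd
  rcases lt_trichotomy k 0 with hk | hk | hk
  · nlinarith
  · simp [hk]
  · nlinarith

-- residue test as a divisibility of the difference
lemma pvResidueIff {p a q : Int} (_hp : 0 < p) (hq0 : 0 ≤ q) (hq1 : q < p) :
    a % p = q ↔ (q - a) % p = 0 := by
  have hqp : q % p = q := Int.emod_eq_of_lt hq0 hq1
  constructor
  · intro h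
    have : (q - a) % p = (q % p - a % p) % p := (Int.sub_emod q a p)
    rw [this, hqp, h]
    simp
  · intro h
    have hdvd : p ∣ (q - a) := Int.dvd_of_emod_eq_zero h
    have hdvd' : p ∣ (a - q) := by
      have h2 : a - q = -(q - a) := by ring
      rw [h2]; exact dvd_neg.mpr hdvd
    have : a % p = q % p :=
      Int.emod_eq_emod_iff_emod_sub_eq_zero.mpr (Int.emod_eq_zero_of_dvd hdvd')
    rw [this, hqp]

-- the closed-form first index ≥ a with residue q
lemma pvFirstMod {p a q : Int} (_hp : 0 < p) (hq0 : 0 ≤ q) (hq1 : q < p) :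
    (a + (q - a) % p) % p = q := by
  have h1 : (a + (q - a) % p) % p = (a + (q - a)) % p := by
    conv_rhs => rw [Int.add_emod, ← Int.emod_emod_of_dvd (q - a) (dvd_refl p), ← Int.add_emod]
  rw [h1]
  have : a + (q - a) = q := by ring
  rw [this]
  exact Int.emod_eq_of_lt hq0 hq1

-- find? of the residue test over an ascending range, in closed form
lemma pvFindClosed {period q : Int} (hp : 0 < period) (hq0 : 0 ≤ q) (hq1 : q < period) :
    ∀ (n : ℕ) (a m : Int), (m - a).toNat = n →
    (PySem.List.pyRange a m 1).find? (fun i => PySem.Int.mod i period == q)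
      = if a + (q - a) % period < m then some (a + (q - a) % period) else none := by
  intro n
  induction n with
  | zero =>
    intro a m ham
    rw [PySem.List.pyRange_one_eq_nil (by omega)]
    have hnn : 0 ≤ (q - a) % period := Int.emod_nonneg _ (by omega)
    rw [if_neg (by omega)]
    rfl
  | succ n ih =>
    intro a m ham
    have hlt : a < m := by omega
    rw [PySem.List.pyRange_one_cons hlt]
    have hnn : 0 ≤ (q - a) % period := Int.emod_nonneg _ (by omega)
    have hub : (q - a) % period < period := Int.emod_lt_of_pos _ hp
    by_cases hres : a % period = q
    · have h0 : (q - a) % period = 0 := (pvResidueIff hp hq0 hq1).mp hres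
      rw [List.find?_cons_of_pos (by
        simp only [beq_iff_eq]
        rw [PySem.Int.mod_eq_emod_of_pos hp]
        exact hres)]
      rw [h0, if_pos (by omega)]
      simp
    · have h0 : (q - a) % period ≠ 0 := fun h => hres ((pvResidueIff hp hq0 hq1).mpr h)
      rw [List.find?_cons_of_neg (by
        simp only [beq_iff_eq]
        rw [PySem.Int.mod_eq_emod_of_pos hp]
        exact hres)]
      rw [ih (a + 1) m (by omega)]
      -- the two closed forms coincide: both are the unique value in [a+1, a+1+period)
      -- with residue q
      have heq : (a + 1) + (q - (a + 1)) % period = a + (q - a) % period := by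
        have hnn' : 0 ≤ (q - (a + 1)) % period := Int.emod_nonneg _ (by omega)
        have hub' : (q - (a + 1)) % period < period := Int.emod_lt_of_pos _ hp
        have hm1 : ((a + 1) + (q - (a + 1)) % period) % period = q :=
          pvFirstMod hp hq0 hq1
        have hm2 : (a + (q - a) % period) % period = q := pvFirstMod hp hq0 hq1
        have hdvd : period ∣ (((a + 1) + (q - (a + 1)) % period) - (a + (q - a) % period)) := by
          rw [Int.dvd_iff_emod_eq_zero, ← Int.emod_eq_emod_iff_emod_sub_eq_zero, hm1, hm2]
        have := pvDvdSmall hp hdvd (by omega) (by omega)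
        omega
      rw [heq]

-- A's guarded loop over range(zs, zs+zc) equals the unguarded loop over the clamped range
lemma pvFoldlGuard (pkt : List Int) (period : Int) :
    ∀ (n : ℕ) (a b : Int), (b - a).toNat = n → ∀ d : PySem.Dict Int Int,
    ((PySem.List.pyRange a b 1).foldl
      (fun d i =>
        if i < (pkt.length : Int) then
          let pos := PySem.Int.mod i period
          if d.contains pos then d else d.insert pos (PySem.List.pyGetD pkt i 0)
        else d) d)
    = (PySem.List.pyRange a (min b (pkt.length : Int)) 1).foldl (pvStepNG pkt period) d := by
  intro n
  induction n with
  | zero =>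
    intro a b hab d
    rw [PySem.List.pyRange_one_eq_nil (by omega),
        PySem.List.pyRange_one_eq_nil (by omega : min b (pkt.length : Int) ≤ a)]
    rfl
  | succ n ih =>
    intro a b hab d
    have hlt : a < b := by omega
    rw [PySem.List.pyRange_one_cons hlt]
    by_cases hL : a < (pkt.length : Int)
    · rw [PySem.List.pyRange_one_cons (by omega : a < min b (pkt.length : Int))]
      simp only [List.foldl_cons, if_pos hL]
      exact ih (a + 1) b (by omega) _
    · rw [PySem.List.pyRange_one_eq_nil (by omega : min b (pkt.length : Int) ≤ a)]
      simp only [List.foldl_cons, if_neg hL, List.foldl_nil]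
      rw [ih (a + 1) b (by omega) d,
          PySem.List.pyRange_one_eq_nil (by omega : min b (pkt.length : Int) ≤ a + 1),
          List.foldl_nil]

-- lookup in the dict built by A's first loop = first index in the list with that residue
lemma pvDictGet (pkt : List Int) (period : Int) (q : Int) :
    ∀ (is : List Int) (d : PySem.Dict Int Int),
    (is.foldl (pvStepNG pkt period) d).get? q =
      (d.get? q).or ((is.find? (fun i => PySem.Int.mod i period == q)).map
        (fun i => PySem.List.pyGetD pkt i 0)) := by
  intro is
  induction is with
  | nil => intro d; simp
  | cons i rest ih =>
    intro d
    rw [List.foldl_cons, ih]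
    unfold pvStepNG
    by_cases hc : d.contains (PySem.Int.mod i period)
    · rw [if_pos hc]
      by_cases hq : PySem.Int.mod i period = q
      · have hs : (d.get? q).isSome := by
          rw [← PySem.Dict.contains_eq_isSome_get?, ← hq]; exact hc
        obtain ⟨v, hv⟩ := Option.isSome_iff_exists.mp hs
        simp [hv]
      · simp [List.find?_cons_of_neg, hq]
    · rw [if_neg hc]
      have hnone : d.get? q = none ∨ PySem.Int.mod i period ≠ q := by
        by_cases hq : PySem.Int.mod i period = q
        · left; rw [PySem.Dict.get?_eq_none_iff_contains, ← hq]
          exact Bool.not_eq_true _ ▸ (by simpa using hc)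
        · right; exact hq
      by_cases hq : PySem.Int.mod i period = q
      · have hdq : d.get? q = none := hnone.resolve_right (by simp [hq])
        rw [PySem.Dict.get?_insert]
        simp [hq, hdq]
      · rw [PySem.Dict.get?_insert]
        simp [hq, Ne.symm hq]

-- every key of the built dict is some residue i % period with i in the list
lemma pvDictKeys (pkt : List Int) (period : Int) (P : Int → Prop) :
    ∀ (is : List Int) (d : PySem.Dict Int Int),
    (∀ p ∈ d.items, P p.1) → (∀ i ∈ is, P (PySem.Int.mod i period)) →
    ∀ p ∈ (is.foldl (pvStepNG pkt period) d).items, P p.1 := by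
  intro is
  induction is with
  | nil => intro d hd _ p hp; exact hd p hp
  | cons i rest ih =>
    intro d hd his p hp
    rw [List.foldl_cons] at hp
    refine ih _ ?_ (fun j hj => his j (List.mem_cons_of_mem _ hj)) p hp
    intro p hp
    unfold pvStepNG at hp
    by_cases hc : d.contains (PySem.Int.mod i period)
    · rw [if_pos hc] at hp; exact hd p hp
    · rw [if_neg hc, PySem.Dict.mem_items_insert] at hp
      rcases hp with h | ⟨h, _⟩
      · rw [h]; exact his i (List.mem_cons_self)
      · exact hd p h

lemma pvDictNodup (pkt : List Int) (period : Int) :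
    ∀ (is : List Int) (d : PySem.Dict Int Int),
    d.keys.Nodup → (is.foldl (pvStepNG pkt period) d).keys.Nodup := by
  intro is
  induction is with
  | nil => intro d hd; exact hd
  | cons i rest ih =>
    intro d hd
    rw [List.foldl_cons]
    refine ih _ ?_
    unfold pvStepNG
    by_cases hc : d.contains (PySem.Int.mod i period)
    · rw [if_pos hc]; exact hd
    · rw [if_neg hc]; exact PySem.Dict.nodup_keys_insert _ _ _ hd

-- A's second loop: writing a nodup in-range association list into ks, read back at q
lemma pvWriteItems (q : ℕ) :
    ∀ (l : List (Int × Int)) (ks : List Int),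
    (l.map Prod.fst).Nodup → (∀ p ∈ l, 0 ≤ p.1 ∧ p.1 < (ks.length : Int)) →
    (l.foldl (fun ks pv => PySem.List.pySetD ks pv.1 pv.2) ks)[q]? =
      ((l.find? (fun pv => pv.1 == (q : Int))).map Prod.snd).or ks[q]? := by
  intro l
  induction l with
  | nil => intro ks _ _; simp
  | cons p rest ih =>
    intro ks hnd hrange
    obtain ⟨hp0, hpl⟩ := hrange p List.mem_cons_self
    rw [List.foldl_cons, PySem.List.pySetD_of_nonneg _ _ hp0]
    rw [ih _ (by simpa using hnd.of_cons) (by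
      intro r hr
      have := hrange r (List.mem_cons_of_mem _ hr)
      simpa using this)]
    by_cases hq : p.1 = (q : Int)
    · have hqq : p.1.toNat = q := by omega
      have hfr : rest.find? (fun pv => pv.1 == (q : Int)) = none := by
        rw [List.find?_eq_none]
        intro r hr
        simp only [beq_iff_eq]
        intro hrq
        have : p.1 ∈ rest.map Prod.fst := by
          rw [hq, ← hrq]; exact List.mem_map_of_mem hr
        rw [List.map_cons] at hnd
        exact (List.nodup_cons.mp hnd).1 (hq ▸ this)
      rw [hfr, List.find?_cons_of_pos (by simpa using hq)]
      rw [List.getElem?_set, if_pos hqq]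
      rw [if_pos (by omega : p.1.toNat < ks.length)]
      simp
    · have hqq : p.1.toNat ≠ q := by omega
      rw [List.find?_cons_of_neg (by simpa using hq)]
      rw [List.getElem?_set, if_neg hqq]

lemma pvLenA (l : List (Int × Int)) :
    ∀ ks : List Int, (l.foldl (fun ks pv => PySem.List.pySetD ks pv.1 pv.2) ks).length = ks.length := by
  induction l with
  | nil => intro ks; rfl
  | cons p rest ih => intro ks; rw [List.foldl_cons, ih, PySem.List.length_pySetD]

-- B as a map over the residues
lemma pvAltMap (pkt : List Int) (period zs zc : Int) :
    extract_keystream_from_zeros_alt pkt period zs zc =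
      (PySem.List.pyRange 0 period 1).map (fun r =>
        if zs + PySem.Int.mod (r - zs) period < min (zs + zc) (pkt.length : Int)
        then PySem.List.pyGetD pkt (zs + PySem.Int.mod (r - zs) period) 0 else 0) := by
  unfold extract_keystream_from_zeros_alt
  rw [PySem.List.foldl_append_singleton_eq_map]
  simp

-- ===== VERDICT (by name: the statement is the Claim_ definition above) =====
theorem extract_keystream_from_zeros_spec : Claim_equal_extract_keystream_from_zeros := by
  intro pkt period zs zc _ hpre
  unfold Spec_extract_keystream_from_zeros
  rw [pvAltMap]
  by_cases hp : 0 < period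
  · -- read both sides back at every position
    simp only [extract_keystream_from_zeros]
    rw [pvFoldlGuard pkt period ((zs + zc) - zs).toNat zs (zs + zc) rfl]
    apply List.ext_getElem?
    intro q
    by_cases hq : q < period.toNat
    · have hks0 : (PySem.List.pyRepeat [(0 : Int)] period).length = period.toNat := by
        rw [PySem.List.pyRepeat_singleton, List.length_replicate]
      rw [pvWriteItems q _ _
          (by
            exact pvDictNodup pkt period (PySem.List.pyRange zs (min (zs + zc) (pkt.length : Int)) 1)
              PySem.Dict.empty PySem.Dict.nodup_keys_empty)
          (by
            intro p hp'
            have := pvDictKeys pkt period (fun k => 0 ≤ k ∧ k < (period : Int))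
              (PySem.List.pyRange zs (min (zs + zc) (pkt.length : Int)) 1) PySem.Dict.empty
              (by intro p hp''; simp [PySem.Dict.empty] at hp'')
              (fun i _ => pvModBounds hp i) p hp'
            rw [hks0]
            omega)]
      rw [show ((((PySem.List.pyRange zs (min (zs + zc) (pkt.length : Int)) 1).foldl
            (pvStepNG pkt period) PySem.Dict.empty).items.find?
            (fun pv => pv.1 == ((q : ℕ) : Int))).map Prod.snd)
          = ((PySem.List.pyRange zs (min (zs + zc) (pkt.length : Int)) 1).foldl
            (pvStepNG pkt period) PySem.Dict.empty).get? ((q : ℕ) : Int) from rfl]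
      rw [pvDictGet]
      rw [pvFindClosed hp (by positivity) (by omega)
            ((min (zs + zc) (pkt.length : Int)) - zs).toNat zs _ rfl]
      -- B side
      rw [List.getElem?_map, PySem.List.getElem?_pyRange_one]
      simp only [PySem.Int.mod_eq_emod_of_pos hp]
      rw [if_pos (show q < (period - 0).toNat by omega)]
      by_cases hin : zs + ((q : Int) - zs) % period < min (zs + zc) (pkt.length : Int)
      · have hemp : ((PySem.Dict.empty : PySem.Dict Int Int).get? (q : Int)) = none := rfl
        rw [if_pos hin, hemp]
        simp only [Option.none_or, Option.map_some, Option.some_or, zero_add]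
        rw [if_pos hin]
      · have hemp : ((PySem.Dict.empty : PySem.Dict Int Int).get? (q : Int)) = none := rfl
        rw [if_neg hin, hemp]
        simp only [Option.map_none, Option.none_or, Option.map_some, zero_add]
        rw [if_neg hin, PySem.List.pyRepeat_singleton, List.getElem?_replicate, if_pos hq]
    · -- out of range on both sides: both lists have length period.toNat
      rw [List.getElem?_eq_none (by
            rw [pvLenA, PySem.List.pyRepeat_singleton, List.length_replicate]; omega),
          List.getElem?_eq_none (by
            rw [List.length_map, PySem.List.length_pyRange_one]; omega)]
  · -- period ≤ 0: Pre_ forces the scanned window to be empty; both sides are []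
    have hper : period ≤ 0 := by omega
    have hempty : ¬ (1 ≤ zc ∧ zs < (pkt.length : Int)) := by
      intro h
      exact absurd (hpre h).1 (by omega)
    simp only [extract_keystream_from_zeros]
    rw [pvFoldlGuard pkt period ((zs + zc) - zs).toNat zs (zs + zc) rfl]
    rw [PySem.List.pyRange_one_eq_nil (by
          have hlen : (0 : Int) ≤ (pkt.length : Int) := by positivity
          omega)]
    rw [PySem.List.pyRange_one_eq_nil (by omega : period ≤ 0)]
    simp [PySem.Dict.empty, PySem.List.pyRepeat_singleton,
      (by omega : period.toNat = 0)]
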